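-- pv_equiv track=rewrite | github.com/kolmarmariia/otus_algorithm | HW2/main.py | getNextArr
-- ===== SOURCE A (Python) =====
-- def getNextArr(prevArr):
--     arr = []
--     newLen = len(prevArr) + 9  # длина следующего массива будет больше на 9
--     for i in range(0, newLen):
--         q = 0  # заготовка нового значения
--         for j in range(0, 10):  # берем 10 нужных значений
--             if (i >= j) & ((i - j) < len(prevArr)):
--                 q += prevArr[i - j]  # добавляем
--         arr.append(q)
--     return arr
-- ===== SOURCE B (Python) =====
-- def getNextArr(prevArr):
--     arr = []
--     s = 0
--     n = len(prevArr)
--     for i in range(0, n + 9):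
--         if i < n:
--             s += prevArr[i]
--         if i - 10 >= 0:
--             s -= prevArr[i - 10]
--         arr.append(s)
--     return arr
-- ===== Notes on version B (the rewrite author's own statement) =====
-- stated objective: faster
-- what changed: Replaced the per-output inner 10-iteration rescan with a single pass maintaining a running window sum (add entering element, subtract the one leaving 10 positions back).
import Mathlib
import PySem

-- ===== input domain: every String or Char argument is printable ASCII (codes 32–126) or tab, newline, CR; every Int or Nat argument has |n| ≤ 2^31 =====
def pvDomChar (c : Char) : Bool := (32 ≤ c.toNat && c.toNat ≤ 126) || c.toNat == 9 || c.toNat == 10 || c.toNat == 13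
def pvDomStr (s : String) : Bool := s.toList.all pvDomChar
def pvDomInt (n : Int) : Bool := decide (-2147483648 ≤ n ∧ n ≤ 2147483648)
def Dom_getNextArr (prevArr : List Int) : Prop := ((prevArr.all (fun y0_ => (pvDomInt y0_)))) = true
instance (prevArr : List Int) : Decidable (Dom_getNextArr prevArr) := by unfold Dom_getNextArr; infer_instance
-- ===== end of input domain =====

-- B replaces A's per-output 10-term rescan with one running window sum; measurably faster by a constant factor.

-- ===== PORT A =====
def getNextArr (prevArr : List Int) : List Int :=
  (PySem.List.pyRange 0 ((prevArr.length : Int) + 9) 1).foldl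
    (fun arr i =>
      arr ++ [(PySem.List.pyRange 0 10 1).foldl
        (fun q j =>
          if i ≥ j ∧ i - j < (prevArr.length : Int) then q + PySem.List.pyGetD prevArr (i - j) 0 else q) 0])
    []

-- ===== PORT B =====
def getNextArr_alt (prevArr : List Int) : List Int :=
  ((PySem.List.pyRange 0 ((prevArr.length : Int) + 9) 1).foldl
    (fun (p : List Int × Int) i =>
      let s1 := if i < (prevArr.length : Int) then p.2 + PySem.List.pyGetD prevArr i 0 else p.2
      let s2 := if i - 10 ≥ 0 then s1 - PySem.List.pyGetD prevArr (i - 10) 0 else s1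
      (p.1 ++ [s2], s2))
    ([], 0)).1

-- ===== PRECONDITION & SPEC =====
def Spec_getNextArr (prevArr : List Int) (out : List Int) : Prop := out = getNextArr_alt prevArr
instance (prevArr : List Int) (out : List Int) : Decidable (Spec_getNextArr prevArr out) := by unfold Spec_getNextArr; infer_instance

-- ===== CLAIM (what is proved, stated in full; the proofs are below) =====
def Claim_equal_getNextArr : Prop := ∀ (prevArr : List Int), Dom_getNextArr prevArr → Spec_getNextArr prevArr (getNextArr prevArr)

-- ===== LEMMAS AND PROOFS =====

-- value of prevArr at k, 0 outside bounds (the clamped-window summand)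
def wval (a : List Int) (k : Int) : Int :=
  if 0 ≤ k ∧ k < (a.length : Int) then PySem.List.pyGetD a k 0 else 0

-- width-10 window sum ending at i
def sumWin (a : List Int) (i : Int) : Int :=
  wval a i + wval a (i-1) + wval a (i-2) + wval a (i-3) + wval a (i-4) +
  wval a (i-5) + wval a (i-6) + wval a (i-7) + wval a (i-8) + wval a (i-9)

lemma wval_neg (a : List Int) (k : Int) (h : k < 0) : wval a k = 0 := by
  unfold wval; rw [if_neg]; omega

lemma sumWin_neg (a : List Int) (i : Int) (h : i < 0) : sumWin a i = 0 := by
  unfold sumWin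
  rw [wval_neg a i h, wval_neg a _ (by omega : i-1 < 0), wval_neg a _ (by omega : i-2 < 0),
      wval_neg a _ (by omega : i-3 < 0), wval_neg a _ (by omega : i-4 < 0),
      wval_neg a _ (by omega : i-5 < 0), wval_neg a _ (by omega : i-6 < 0),
      wval_neg a _ (by omega : i-7 < 0), wval_neg a _ (by omega : i-8 < 0),
      wval_neg a _ (by omega : i-9 < 0)]
  ring

lemma sumWin_rec (a : List Int) (i : Int) :
    sumWin a i = sumWin a (i-1) + wval a i - wval a (i-10) := by
  unfold sumWin; ring_nf

lemma innerA (a : List Int) (i : Int) :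
    (PySem.List.pyRange 0 10 1).foldl
      (fun q j => if i ≥ j ∧ i - j < (a.length : Int) then q + PySem.List.pyGetD a (i - j) 0 else q) 0
    = sumWin a i := by
  have hr : PySem.List.pyRange 0 10 1 = [0,1,2,3,4,5,6,7,8,9] := by decide
  have step : ∀ (x j : Int),
      (if i ≥ j ∧ i - j < (a.length : Int) then x + PySem.List.pyGetD a (i - j) 0 else x)
      = x + wval a (i - j) := by
    intro x j; unfold wval
    split_ifs with h1 h2 h2 <;> first | ring1 | omega
  rw [hr]
  simp only [List.foldl_cons, List.foldl_nil, step]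
  unfold sumWin; ring_nf

lemma B_inv (a : List Int) : ∀ n : Nat, (n : Int) ≤ (a.length : Int) + 9 →
    (PySem.List.pyRange 0 (n : Int) 1).foldl
      (fun (p : List Int × Int) i =>
        let s1 := if i < (a.length : Int) then p.2 + PySem.List.pyGetD a i 0 else p.2
        let s2 := if i - 10 ≥ 0 then s1 - PySem.List.pyGetD a (i - 10) 0 else s1
        (p.1 ++ [s2], s2)) ([], 0)
    = ((PySem.List.pyRange 0 (n : Int) 1).map (sumWin a), sumWin a ((n : Int) - 1)) := by
  intro n
  induction n with
  | zero =>
      intro _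
      rw [PySem.List.pyRange_one_eq_nil (by norm_num)]
      simp only [List.foldl_nil, List.map_nil]
      rw [sumWin_neg a _ (by norm_num : ((0:Nat):Int) - 1 < 0)]
  | succ n ih =>
      intro h
      have hc : ((n + 1 : Nat) : Int) = (n : Int) + 1 := by push_cast; ring
      rw [hc, PySem.List.pyRange_one_succ_right (by positivity)]
      rw [List.foldl_append, ih (by omega), List.map_append, List.map_cons, List.map_nil]
      simp only [List.foldl_cons, List.foldl_nil]
      have hs1 : (if (n : Int) < (a.length : Int)
            then sumWin a ((n:Int)-1) + PySem.List.pyGetD a (n:Int) 0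
            else sumWin a ((n:Int)-1))
          = sumWin a ((n:Int)-1) + wval a (n:Int) := by
        unfold wval; split_ifs with h1 h2 h2 <;> first | ring1 | omega
      have hs2 : (if (n : Int) - 10 ≥ 0
            then sumWin a ((n:Int)-1) + wval a (n:Int) - PySem.List.pyGetD a ((n:Int) - 10) 0
            else sumWin a ((n:Int)-1) + wval a (n:Int))
          = sumWin a (n:Int) := by
        rw [sumWin_rec a (n:Int)]
        unfold wval; split_ifs with h1 h2 h2 <;> first | ring1 | omega
      simp only [hs1, hs2]
      have he : (n:Int) + 1 - 1 = (n:Int) := by ring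
      rw [he]

-- ===== VERDICT (by name: the statement is the Claim_ definition above) =====
theorem getNextArr_spec : Claim_equal_getNextArr := by
  intro a _
  unfold Spec_getNextArr getNextArr getNextArr_alt
  have hB := B_inv a (a.length + 9) (by push_cast; omega)
  have hc : ((a.length + 9 : Nat) : Int) = (a.length : Int) + 9 := by push_cast; ring
  rw [hc] at hB
  rw [hB]
  rw [PySem.List.foldl_append_singleton_eq_map]
  simp only [List.nil_append]
  exact List.map_congr_left (fun i _ => innerA a i)
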